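-- pv_equiv track=rewrite | github.com/sssungjin/Algorithm | 프로그래머스/2/12914. 멀리 뛰기/멀리 뛰기.py | solution
-- ===== SOURCE A (Python) =====
-- def solution(n):
--     answer = 0
--     dp = [0] * (n+1)
--     dp[0], dp[1] = 1, 2
--
--     for i in range(2, n):
--         dp[i] = dp[i-2] + dp[i-1]
--
--     answer = dp[n-1] % 1234567
--
--     return answer
-- ===== SOURCE B (Python) =====
-- def solution(n):
--     # Fast-doubling Fibonacci mod 1234567: answer = F(n+1) mod 1234567 with F(1)=F(2)=1.
--     MOD = 1234567
--
--     def fib_pair(k):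
--         # returns (F(k) % MOD, F(k+1) % MOD)
--         if k == 0:
--             return (0, 1)
--         a, b = fib_pair(k // 2)
--         c = (a * (2 * b - a)) % MOD
--         d = (a * a + b * b) % MOD
--         if k % 2 == 0:
--             return (c, d)
--         return (d, (c + d) % MOD)
--
--     return fib_pair(n + 1)[0]
-- ===== Notes on version B (the rewrite author's own statement) =====
-- stated objective: faster
-- what changed: Replaced the O(n) dp-array Fibonacci loop with fast-doubling Fibonacci recursion with modular arithmetic, computing F(n+1) mod 1234567 in O(log n) multiplications.
import Mathlib
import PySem

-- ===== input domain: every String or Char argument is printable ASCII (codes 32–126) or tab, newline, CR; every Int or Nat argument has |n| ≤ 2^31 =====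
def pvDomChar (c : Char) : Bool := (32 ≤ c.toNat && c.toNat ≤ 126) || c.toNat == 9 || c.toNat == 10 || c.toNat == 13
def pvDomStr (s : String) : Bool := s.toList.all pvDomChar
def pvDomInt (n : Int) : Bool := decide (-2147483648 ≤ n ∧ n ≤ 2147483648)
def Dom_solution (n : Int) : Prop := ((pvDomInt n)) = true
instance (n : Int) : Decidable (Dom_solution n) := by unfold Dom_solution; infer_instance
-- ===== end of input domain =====

-- B replaces A's O(n) dp-array loop by fast-doubling Fibonacci recursion mod 1234567 (O(log n)).

-- ===== PORT A =====
-- dp = [0]*(n+1); dp[0], dp[1] = 1, 2; for i in range(2, n): dp[i] = dp[i-2] + dp[i-1]; return dp[n-1] % 1234567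
def solution (n : Int) : Int :=
  let dp : List Int := List.replicate (n + 1).toNat 0
  let dp := PySem.List.pySetD dp 0 1
  let dp := PySem.List.pySetD dp 1 2
  let dp := (PySem.List.pyRange 2 n 1).foldl
      (fun dp i =>
        PySem.List.pySetD dp i (PySem.List.pyGetD dp (i - 2) 0 + PySem.List.pyGetD dp (i - 1) 0))
      dp
  PySem.Int.mod (PySem.List.pyGetD dp (n - 1) 0) 1234567

-- ===== PORT B =====
-- fib_pair(k) = (F(k) % 1234567, F(k+1) % 1234567), fast doubling on k // 2.
-- Fuel makes the recursion structural (fuel = k suffices since k // 2 < k); same computation as Source B.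
def fibPairAux : Nat → Nat → Int × Int
  | 0, _ => (0, 1)
  | fuel + 1, k =>
    if k = 0 then (0, 1)
    else
      let p := fibPairAux fuel (k / 2)
      let a := p.1
      let b := p.2
      let c := (a * (2 * b - a)) % 1234567
      let d := (a * a + b * b) % 1234567
      if k % 2 = 0 then (c, d) else (d, (c + d) % 1234567)

-- (n+1).toNat: exact for n ≥ -1; for n ≤ -2 the Python B does not return (outside Pre_).
def solution_alt (n : Int) : Int := (fibPairAux (n + 1).toNat (n + 1).toNat).1

-- ===== PRECONDITION & SPEC =====
-- Pre_ excludes n ≤ 0, where A raises IndexError (dp has fewer than 2 cells / dp[n-1] out of range).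
def Pre_solution (n : Int) : Prop := 1 ≤ n
instance (n : Int) : Decidable (Pre_solution n) := by unfold Pre_solution; infer_instance
def pvWitness_solution : Int := 5

def Spec_solution (n : Int) (out : Int) : Prop := out = solution_alt n
instance (n : Int) (out : Int) : Decidable (Spec_solution n out) := by unfold Spec_solution; infer_instance

-- ===== CLAIM (what is proved, stated in full; the proofs are below) =====
def Claim_equal_solution : Prop := ∀ (n : Int), Dom_solution n → Pre_solution n → Spec_solution n (solution n)

-- ===== LEMMAS AND PROOFS =====

-- B side: fibPairAux computes the Fibonacci pair mod 1234567 when fuel ≥ k.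
lemma modeq_self (a : Int) : (a % 1234567) ≡ a [ZMOD 1234567] :=
  Int.emod_emod_of_dvd a dvd_rfl

lemma fib_cast_two_mul (j : Nat) :
    (Nat.fib (2 * j) : Int) = (Nat.fib j : Int) * (2 * (Nat.fib (j + 1) : Int) - (Nat.fib j : Int)) := by
  have h : Nat.fib j ≤ 2 * Nat.fib (j + 1) := by
    have := Nat.fib_le_fib_succ (n := j); omega
  rw [Nat.fib_two_mul]
  push_cast [Nat.cast_sub h]
  ring

lemma fib_cast_two_mul_add_one (j : Nat) :
    (Nat.fib (2 * j + 1) : Int) = (Nat.fib (j + 1) : Int) * (Nat.fib (j + 1) : Int) + (Nat.fib j : Int) * (Nat.fib j : Int) := by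
  rw [Nat.fib_two_mul_add_one]
  push_cast
  ring

lemma fibPairAux_eq : ∀ (fuel k : Nat), k ≤ fuel →
    fibPairAux fuel k = ((Nat.fib k : Int) % 1234567, (Nat.fib (k + 1) : Int) % 1234567) := by
  intro fuel
  induction fuel with
  | zero =>
    intro k hk
    interval_cases k
    simp [fibPairAux]
  | succ f ih =>
    intro k hk
    by_cases h0 : k = 0
    · subst h0; simp [fibPairAux]
    · have hrec : k / 2 ≤ f := by omega
      have := ih (k / 2) hrec
      simp only [fibPairAux, if_neg h0, this]
      set j := k / 2 with hj
      have hc : ((Nat.fib j : Int) % 1234567 * (2 * ((Nat.fib (j+1) : Int) % 1234567) - (Nat.fib j : Int) % 1234567)) % 1234567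
          = (Nat.fib (2 * j) : Int) % 1234567 := by
        rw [fib_cast_two_mul]
        exact (modeq_self _).mul (((Int.ModEq.refl 2).mul (modeq_self _)).sub (modeq_self _))
      have hd : ((Nat.fib j : Int) % 1234567 * ((Nat.fib j : Int) % 1234567) + (Nat.fib (j+1) : Int) % 1234567 * ((Nat.fib (j+1) : Int) % 1234567)) % 1234567
          = (Nat.fib (2 * j + 1) : Int) % 1234567 := by
        rw [fib_cast_two_mul_add_one]
        have := ((modeq_self ((Nat.fib (j+1) : Int))).mul (modeq_self ((Nat.fib (j+1) : Int)))).add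
          ((modeq_self ((Nat.fib j : Int))).mul (modeq_self ((Nat.fib j : Int))))
        calc ((Nat.fib j : Int) % 1234567 * ((Nat.fib j : Int) % 1234567) + (Nat.fib (j+1) : Int) % 1234567 * ((Nat.fib (j+1) : Int) % 1234567)) % 1234567
            = ((Nat.fib (j+1) : Int) % 1234567 * ((Nat.fib (j+1) : Int) % 1234567) + (Nat.fib j : Int) % 1234567 * ((Nat.fib j : Int) % 1234567)) % 1234567 := by ring_nf
          _ = ((Nat.fib (j+1) : Int) * (Nat.fib (j+1) : Int) + (Nat.fib j : Int) * (Nat.fib j : Int)) % 1234567 := this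
      by_cases hpar : k % 2 = 0
      · have hk2 : 2 * j = k := by omega
        have hk21 : 2 * j + 1 = k + 1 := by omega
        simp only [if_pos hpar, hc, hd, hk2]
      · have hk2 : 2 * j + 1 = k := by omega
        have hk22 : 2 * j + 2 = k + 1 := by omega
        simp only [if_neg hpar, hc, hd, hk2]
        refine Prod.ext rfl ?_
        simp only
        have : ((Nat.fib (2*j) : Int) % 1234567 + (Nat.fib (2*j+1) : Int) % 1234567) % 1234567
            = ((Nat.fib (2*j) : Int) + (Nat.fib (2*j+1) : Int)) % 1234567 :=
          (modeq_self _).add (modeq_self _)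
        rw [hk2] at this
        rw [this]
        congr 1
        rw [← hk22, ← hk2]
        have := Nat.fib_add_two (n := 2 * j)
        push_cast [this]
        ring

lemma solution_alt_eq (n' : Nat) :
    solution_alt (n' : Int) = (Nat.fib (n' + 1) : Int) % 1234567 := by
  have h : ((n' : Int) + 1).toNat = n' + 1 := by omega
  rw [solution_alt, h, fibPairAux_eq _ _ le_rfl]

-- A side: invariant of the dp loop.
def pvStep (dp : List Int) (i : Int) : List Int :=
  PySem.List.pySetD dp i (PySem.List.pyGetD dp (i - 2) 0 + PySem.List.pyGetD dp (i - 1) 0)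

def pvInit (n' : Nat) : List Int :=
  PySem.List.pySetD (PySem.List.pySetD (List.replicate (n' + 1) 0) 0 1) 1 2

def pvDp (n' m : Nat) : List Int :=
  (PySem.List.pyRange 2 (m : Int) 1).foldl pvStep (pvInit n')

lemma pvInit_getD (n' : Nat) (hn : 1 ≤ n') (j : Nat) :
    (pvInit n').getD j 0 = if j < 2 then (Nat.fib (j + 2) : Int) else 0 := by
  rw [pvInit]
  rw [PySem.List.pySetD_of_nonneg _ _ (by norm_num), PySem.List.pySetD_of_nonneg _ _ (by norm_num)]
  simp only [Int.toNat_zero, Int.toNat_one]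
  rw [List.getD_eq_getElem?_getD]
  rcases j with _ | _ | j
  · rw [List.getElem?_set_ne (by omega), List.getElem?_set_self (by simp)]
    simp
  · rw [List.getElem?_set_self (by simp; omega)]
    simp [show Nat.fib 3 = 2 from rfl]
  · rw [List.getElem?_set_ne (by omega), List.getElem?_set_ne (by omega), if_neg (by omega)]
    simp [List.getElem?_replicate]
    split <;> rfl

lemma pvInit_length (n' : Nat) : (pvInit n').length = n' + 1 := by
  rw [pvInit]
  rw [PySem.List.pySetD_of_nonneg _ _ (by norm_num), PySem.List.pySetD_of_nonneg _ _ (by norm_num)]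
  simp

lemma pvDp_inv (n' : Nat) (hn : 1 ≤ n') :
    ∀ m, m ≤ n' → (pvDp n' m).length = n' + 1 ∧
      ∀ j : Nat, (pvDp n' m).getD j 0 = if j < max m 2 then (Nat.fib (j + 2) : Int) else 0 := by
  intro m
  induction m with
  | zero =>
    intro _
    constructor
    · rw [pvDp, PySem.List.pyRange_one_eq_nil (by norm_num)]
      exact pvInit_length n'
    · intro j
      rw [pvDp, PySem.List.pyRange_one_eq_nil (by norm_num)]
      simpa using pvInit_getD n' hn j
  | succ m ih =>
    intro hm
    have hm' : m ≤ n' := by omega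
    obtain ⟨hlen, hget⟩ := ih hm'
    by_cases h2 : m < 2
    · have he : pvDp n' (m + 1) = pvDp n' m := by
        rw [pvDp, pvDp, PySem.List.pyRange_one_eq_nil (by omega),
          PySem.List.pyRange_one_eq_nil (by omega)]
      rw [he]
      refine ⟨hlen, fun j => ?_⟩
      rw [hget j]
      have : max (m + 1) 2 = max m 2 := by omega
      rw [this]
    · -- 2 ≤ m : the loop body runs with i = m
      have hsplit : PySem.List.pyRange 2 ((m : Int) + 1) 1
          = PySem.List.pyRange 2 (m : Int) 1 ++ [(m : Int)] :=
        PySem.List.pyRange_one_succ_right (by omega)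
      have he : pvDp n' (m + 1) = pvStep (pvDp n' m) (m : Int) := by
        rw [pvDp, pvDp]
        push_cast
        rw [hsplit, List.foldl_append]
        simp
      have hmlt : m < (pvDp n' m).length := by omega
      have hval : PySem.List.pyGetD (pvDp n' m) ((m : Int) - 2) 0
            + PySem.List.pyGetD (pvDp n' m) ((m : Int) - 1) 0 = (Nat.fib (m + 2) : Int) := by
        have h1 : ((m : Int) - 2) = ((m - 2 : Nat) : Int) := by omega
        have h2' : ((m : Int) - 1) = ((m - 1 : Nat) : Int) := by omega
        rw [h1, h2', PySem.List.pyGetD_natCast, PySem.List.pyGetD_natCast,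
          hget (m - 2), hget (m - 1)]
        rw [if_pos (by omega), if_pos (by omega)]
        have e1 : m - 2 + 2 = m := by omega
        have e2 : m - 1 + 2 = m + 1 := by omega
        rw [e1, e2]
        have := Nat.fib_add_two (n := m)
        push_cast [this]
        ring
      rw [he, pvStep, hval, PySem.List.pySetD_of_nonneg _ _ (by positivity)]
      rw [Int.toNat_natCast]
      constructor
      · simp [hlen]
      · intro j
        rcases eq_or_ne j m with rfl | hne
        · rw [List.getD_eq_getElem?_getD, List.getElem?_set_self (by omega)]
          rw [if_pos (by omega)]
          rfl
        · rw [List.getD_eq_getElem?_getD, List.getElem?_set_ne (by omega)]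
          rw [← List.getD_eq_getElem?_getD, hget j]
          by_cases hj : j < max m 2
          · rw [if_pos hj, if_pos (by omega)]
          · rw [if_neg hj, if_neg (by omega)]

lemma solution_eq (n' : Nat) (hn : 1 ≤ n') :
    solution (n' : Int) = (Nat.fib (n' + 1) : Int) % 1234567 := by
  obtain ⟨hlen, hget⟩ := pvDp_inv n' hn n' le_rfl
  have hA : solution (n' : Int)
      = PySem.Int.mod (PySem.List.pyGetD (pvDp n' n') ((n' : Int) - 1) 0) 1234567 := by
    rw [solution]
    have h1 : ((n' : Int) + 1).toNat = n' + 1 := by omega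
    rw [h1]
    rfl
  rw [hA]
  have h2 : ((n' : Int) - 1) = ((n' - 1 : Nat) : Int) := by omega
  rw [h2, PySem.List.pyGetD_natCast, hget (n' - 1), if_pos (by omega)]
  have e : n' - 1 + 2 = n' + 1 := by omega
  rw [e, PySem.Int.mod_eq_emod_of_pos (by norm_num)]

-- ===== VERDICT (by name: the statement is the Claim_ definition above) =====
theorem solution_spec : Claim_equal_solution := by
  intro n _ hpre
  unfold Spec_solution
  unfold Pre_solution at hpre
  have hn : n = ((n.toNat : Nat) : Int) := by omega
  rw [hn, solution_eq n.toNat (by omega), solution_alt_eq n.toNat]
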